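-- pv_equiv track=rewrite | github.com/shahafabileah/wordle_analysis | solver.py | letter_frequency_histogram
-- ===== SOURCE A (Python) =====
-- from collections import defaultdict
--
-- def letter_frequency_histogram(words):
--   # This histogram has entries like
--   #   ('a', 1) => the number words that have at least 1 a
--   #   ('a', 2) => the number of words that have at least 2 a's
--   histogram = defaultdict(int)
--
--   for word in words:
--     # This histogram is a simple tally of the number of times each letter appears in the word.
--     # For the word 'esses':
--     #   'e' => 2
--     #   's' => 3
--     word_histogram = defaultdict(int)
--     for letter in word:
--       word_histogram[letter] += 1
--       count_so_far = word_histogram[letter]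
--       histogram[(letter, count_so_far)] += 1
--
--   return histogram
-- ===== SOURCE B (Python) =====
-- from collections import defaultdict, Counter
--
-- def letter_frequency_histogram(words):
--   # Phase 1: for each word, emit one key (letter, k) the k-th time the letter
--   # appears, computed from the prefix count (no per-word running dict).
--   keys = [(c, word[:i + 1].count(c))
--           for word in words
--           for i, c in enumerate(word)]
--   # Phase 2: tally all keys at once.
--   histogram = defaultdict(int)
--   histogram.update(Counter(keys))
--   return histogram
-- ===== Notes on version B (the rewrite author's own statement) =====
-- stated objective: alternative
-- what changed: A interleaves a per-word running tally with incrementing the global histogram in one nested loop; B first materialises the flat list of (letter, k-th-occurrence) keys using prefix counts, then tallies that whole list in a single Counter pass.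
import Mathlib
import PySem

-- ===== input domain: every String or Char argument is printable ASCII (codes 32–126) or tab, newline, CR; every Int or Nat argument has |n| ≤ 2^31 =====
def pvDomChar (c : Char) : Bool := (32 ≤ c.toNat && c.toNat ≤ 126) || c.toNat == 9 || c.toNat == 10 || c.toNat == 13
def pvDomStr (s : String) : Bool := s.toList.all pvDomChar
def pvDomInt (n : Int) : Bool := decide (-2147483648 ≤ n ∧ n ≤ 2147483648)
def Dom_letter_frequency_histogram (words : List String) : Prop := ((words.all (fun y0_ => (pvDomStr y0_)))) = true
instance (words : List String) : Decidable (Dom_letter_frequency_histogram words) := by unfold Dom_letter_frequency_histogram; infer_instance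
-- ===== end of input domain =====

-- B replaces A's interleaved per-word running tally with a two-phase pass: first build the
-- flat list of (letter, k-th occurrence) keys via prefix counts, then tally them with one
-- Counter (objective: alternative decomposition, not faster).

-- ===== PORT A =====
def letter_frequency_histogram (words : List String) : List (String × Int × Int) :=
  let hist : PySem.Dict (String × Int) Int :=
    words.foldl (fun h word =>
      (word.toList.foldl
        (fun (st : PySem.Dict String Int × PySem.Dict (String × Int) Int) c =>
          let letter := c.toString
          let wh := st.1.insert letter (st.1.getD letter 0 + 1)
          let cnt := wh.getD letter 0
          (wh, st.2.insert (letter, cnt) (st.2.getD (letter, cnt) 0 + 1)))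
        ((PySem.Dict.empty : PySem.Dict String Int), h)).2)
      (PySem.Dict.empty : PySem.Dict (String × Int) Int)
  hist.items.map (fun p => (p.1.1, p.1.2, p.2))

-- ===== PORT B =====
-- keys = [(c, word[:i+1].count(c)) for word in words for i, c in enumerate(word)]
-- (str.count with a 1-character needle is exactly the character count of the slice)
def lfh_keys (words : List String) : List (String × Int) :=
  words.flatMap (fun word =>
    (PySem.List.enumerate word.toList).map (fun ic =>
      (ic.2.toString,
       ((PySem.List.slice word.toList none (some (ic.1 + 1))).count ic.2 : Int))))

def letter_frequency_histogram_alt (words : List String) : List (String × Int × Int) :=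
  (PySem.Dict.counter (lfh_keys words)).items.map (fun p => (p.1.1, p.1.2, p.2))

-- ===== PRECONDITION & SPEC =====
def Spec_letter_frequency_histogram (words : List String) (out : List (String × Int × Int)) : Prop := out = letter_frequency_histogram_alt words
instance (words : List String) (out : List (String × Int × Int)) : Decidable (Spec_letter_frequency_histogram words out) := by unfold Spec_letter_frequency_histogram; infer_instance

-- ===== CLAIM (what is proved, stated in full; the proofs are below) =====
def Claim_equal_letter_frequency_histogram : Prop := ∀ (words : List String), Dom_letter_frequency_histogram words → Spec_letter_frequency_histogram words (letter_frequency_histogram words)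

-- ===== LEMMAS AND PROOFS =====

-- the stream of (letter, occurrence-number) keys A's inner loop feeds the global histogram,
-- given that the letters `pre` were already processed for the current word
def keyStream (pre l : List Char) : List (String × Int) :=
  match l with
  | [] => []
  | c :: cs => (c.toString, ((pre.count c : Int) + 1)) :: keyStream (pre ++ [c]) cs

def incrK (h : PySem.Dict (String × Int) Int) (k : String × Int) : PySem.Dict (String × Int) Int :=
  h.insert k (h.getD k 0 + 1)

def whOf (pre : List Char) : PySem.Dict String Int :=
  pre.foldl (fun d c => d.insert c.toString (d.getD c.toString 0 + 1)) PySem.Dict.empty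

lemma char_toString_injective : Function.Injective Char.toString := by
  intro a b hab
  have := congrArg String.toList hab
  simpa using this

lemma whOf_getD (pre : List Char) (c : Char) :
    (whOf pre).getD c.toString 0 = (pre.count c : Int) := by
  have h1 : whOf pre = (pre.map Char.toString).foldl
      (fun d s => d.insert s (d.getD s 0 + 1)) PySem.Dict.empty := by
    simp [whOf, List.foldl_map]
  rw [h1, PySem.Dict.getD_foldl_insert_add_one,
    List.count_map_of_injective _ _ char_toString_injective]
  simp

lemma inner_fold (l : List Char) (pre : List Char) (h : PySem.Dict (String × Int) Int) :
    l.foldl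
      (fun (st : PySem.Dict String Int × PySem.Dict (String × Int) Int) c =>
        let letter := c.toString
        let wh := st.1.insert letter (st.1.getD letter 0 + 1)
        let cnt := wh.getD letter 0
        (wh, st.2.insert (letter, cnt) (st.2.getD (letter, cnt) 0 + 1)))
      (whOf pre, h)
    = (whOf (pre ++ l), (keyStream pre l).foldl incrK h) := by
  induction l generalizing pre h with
  | nil => simp [keyStream]
  | cons c cs ih =>
    have hwh : (whOf pre).insert c.toString ((whOf pre).getD c.toString 0 + 1)
        = whOf (pre ++ [c]) := by
      simp [whOf, List.foldl_append]
    have hcnt : (whOf (pre ++ [c])).getD c.toString 0 = (pre.count c : Int) + 1 := by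
      rw [← hwh, PySem.Dict.getD_insert_self, whOf_getD]
    simp only [List.foldl_cons, keyStream]
    rw [show (pre ++ c :: cs) = (pre ++ [c]) ++ cs by simp, ← ih (pre ++ [c])]
    simp only [hwh, hcnt, incrK]

-- B's per-word key list is exactly A's key stream
lemma keyStream_eq (l pre : List Char) :
    (PySem.List.enumerate l ((pre.length : Nat) : Int)).map (fun ic =>
      (ic.2.toString,
       ((PySem.List.slice (pre ++ l) none (some (ic.1 + 1))).count ic.2 : Int)))
    = keyStream pre l := by
  induction l generalizing pre with
  | nil => simp [keyStream, PySem.List.enumerate_nil]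
  | cons c cs ih =>
    rw [PySem.List.enumerate_cons, List.map_cons, keyStream]
    congr 1
    · have h1 : ((pre.length : Nat) : Int) + 1 = (((pre.length + 1 : Nat)) : Int) := by
        push_cast; ring
      show (c.toString, _) = (c.toString, _)
      rw [h1, PySem.List.slice_to_natCast]
      have h2 : (pre ++ c :: cs).take (pre.length + 1) = pre ++ [c] := by
        rw [List.take_append]; simp
      rw [h2]
      simp [List.count_append]
    · have h1 : ((pre.length : Nat) : Int) + 1 = (((pre ++ [c]).length : Nat) : Int) := by
        simp
      rw [h1, show pre ++ c :: cs = (pre ++ [c]) ++ cs by simp, ih (pre ++ [c])]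

lemma foldl_flatMap_incrK (words : List String) (h : PySem.Dict (String × Int) Int)
    (f : String → List (String × Int)) :
    (words.flatMap f).foldl incrK h
      = words.foldl (fun h w => (f w).foldl incrK h) h := by
  induction words generalizing h with
  | nil => rfl
  | cons w ws ih => simp [List.flatMap_cons, List.foldl_append, ih]

lemma hist_eq (words : List String) :
    words.foldl (fun h word =>
      (word.toList.foldl
        (fun (st : PySem.Dict String Int × PySem.Dict (String × Int) Int) c =>
          let letter := c.toString
          let wh := st.1.insert letter (st.1.getD letter 0 + 1)
          let cnt := wh.getD letter 0
          (wh, st.2.insert (letter, cnt) (st.2.getD (letter, cnt) 0 + 1)))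
        ((PySem.Dict.empty : PySem.Dict String Int), h)).2)
      (PySem.Dict.empty : PySem.Dict (String × Int) Int)
    = PySem.Dict.counter (lfh_keys words) := by
  have hA : ∀ (w : String) (h : PySem.Dict (String × Int) Int),
      (w.toList.foldl
        (fun (st : PySem.Dict String Int × PySem.Dict (String × Int) Int) c =>
          let letter := c.toString
          let wh := st.1.insert letter (st.1.getD letter 0 + 1)
          let cnt := wh.getD letter 0
          (wh, st.2.insert (letter, cnt) (st.2.getD (letter, cnt) 0 + 1)))
        ((PySem.Dict.empty : PySem.Dict String Int), h)).2
      = (keyStream [] w.toList).foldl incrK h := by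
    intro w h
    have hfold := inner_fold w.toList [] h
    simp only [whOf, List.foldl_nil, List.nil_append] at hfold
    rw [hfold]
  have hkeys : lfh_keys words = words.flatMap (fun w => keyStream [] w.toList) := by
    unfold lfh_keys
    congr 1
    funext w
    have hk := keyStream_eq w.toList []
    simpa using hk
  rw [hkeys, ← PySem.Dict.foldl_insert_getD_add_one_eq_counter,
    show (fun (d : PySem.Dict (String × Int) Int) (x : String × Int) =>
      d.insert x (d.getD x 0 + 1)) = incrK from rfl,
    foldl_flatMap_incrK]
  have hfun : (fun (h : PySem.Dict (String × Int) Int) (word : String) =>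
      (word.toList.foldl
        (fun (st : PySem.Dict String Int × PySem.Dict (String × Int) Int) c =>
          let letter := c.toString
          let wh := st.1.insert letter (st.1.getD letter 0 + 1)
          let cnt := wh.getD letter 0
          (wh, st.2.insert (letter, cnt) (st.2.getD (letter, cnt) 0 + 1)))
        ((PySem.Dict.empty : PySem.Dict String Int), h)).2)
      = (fun h w => (keyStream [] w.toList).foldl incrK h) := by
    funext h w
    exact hA w h
  rw [hfun]

-- ===== VERDICT (by name: the statement is the Claim_ definition above) =====
theorem letter_frequency_histogram_spec : Claim_equal_letter_frequency_histogram := by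
  intro words _
  unfold Spec_letter_frequency_histogram letter_frequency_histogram letter_frequency_histogram_alt
  rw [hist_eq]
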